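-- pv_equiv track=rewrite | github.com/Jonathunky/everycase | pages/case_skus.py | sort_table_columns
-- ===== SOURCE A (Python) =====
-- def sort_table_columns(table):
--     # Find the indices of the columns based on alphabetical order in the first non-header row
--     first_row = table[1][1:]  # Skip the first column ('Model / Color')
--     alpha_indices = sorted(range(len(first_row)), key=lambda i: first_row[i])
--
--     # Rearrange the table columns based on the sorted indices
--     sorted_table = []
--     for row in table:
--         sorted_row = [row[0]] + [row[i + 1] if i + 1 < len(row) else "" for i in alpha_indices]
--         sorted_table.append(sorted_row)
--
--     return sorted_table
-- ===== SOURCE B (Python) =====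
-- def sort_table_columns(table):
--     # Transpose into (key, column) pairs, sort the whole columns by key, transpose back.
--     first_row = table[1][1:]  # Skip the first column ('Model / Color')
--     columns = [
--         (first_row[c], [row[c + 1] if c + 1 < len(row) else "" for row in table])
--         for c in range(len(first_row))
--     ]
--     columns.sort(key=lambda pair: pair[0])  # stable, like sorted()
--     return [
--         [row[0]] + [col[r] for _, col in columns]
--         for r, row in enumerate(table)
--     ]
-- ===== Notes on version B (the rewrite author's own statement) =====
-- stated objective: alternative
-- what changed: B transposes the table into whole (key, column) pairs, stably sorts the columns themselves, and transposes back via enumerate, instead of A's sorting of column indices and per-row re-indexing.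
import Mathlib
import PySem

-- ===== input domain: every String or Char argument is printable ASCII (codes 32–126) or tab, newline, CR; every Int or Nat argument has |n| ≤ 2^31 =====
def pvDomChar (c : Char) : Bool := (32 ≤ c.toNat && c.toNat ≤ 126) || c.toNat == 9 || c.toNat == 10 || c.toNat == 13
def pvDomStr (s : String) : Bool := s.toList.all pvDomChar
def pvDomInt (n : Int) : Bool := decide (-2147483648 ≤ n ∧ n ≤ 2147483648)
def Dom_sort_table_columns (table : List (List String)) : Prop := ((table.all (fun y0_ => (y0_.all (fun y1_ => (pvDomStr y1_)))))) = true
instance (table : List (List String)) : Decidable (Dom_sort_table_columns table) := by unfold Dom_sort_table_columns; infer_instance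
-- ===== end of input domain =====

-- B sorts whole (key, column) pairs and transposes back instead of A's index sort + per-row re-indexing; objective: alternative decomposition.

-- ===== PORT A =====
def sort_table_columns (table : List (List String)) : List (List String) :=
  -- first_row = table[1][1:]
  let first_row := PySem.List.slice ((PySem.List.pyGet? table 1).getD []) (some 1) none
  -- alpha_indices = sorted(range(len(first_row)), key=lambda i: first_row[i])
  let alpha_indices := PySem.List.sorted (PySem.List.pyRange 0 first_row.length 1)
      (fun i => (PySem.List.pyGet? first_row i).getD "") false
  -- for row in table: sorted_table.append([row[0]] + [...])
  table.foldl (fun acc row =>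
    acc ++ [((PySem.List.pyGet? row 0).getD "") ::
      alpha_indices.map (fun i =>
        if i + 1 < (row.length : Int) then (PySem.List.pyGet? row (i + 1)).getD "" else "")]) []

-- ===== PORT B =====
def sort_table_columns_alt (table : List (List String)) : List (List String) :=
  -- first_row = table[1][1:]
  let first_row := PySem.List.slice ((PySem.List.pyGet? table 1).getD []) (some 1) none
  -- columns = [(first_row[c], [row[c+1] if c+1 < len(row) else "" for row in table]) for c in range(len(first_row))]
  let columns := (PySem.List.pyRange 0 first_row.length 1).map (fun c =>
      ((PySem.List.pyGet? first_row c).getD "",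
       table.map (fun row =>
         if c + 1 < (row.length : Int) then (PySem.List.pyGet? row (c + 1)).getD "" else "")))
  -- columns.sort(key=lambda pair: pair[0])
  let sortedCols := PySem.List.sorted columns (fun pair => pair.1) false
  -- [[row[0]] + [col[r] for _, col in columns] for r, row in enumerate(table)]
  (PySem.List.enumerate table).map (fun p =>
    ((PySem.List.pyGet? p.2 0).getD "") ::
      sortedCols.map (fun q => (PySem.List.pyGet? q.2 p.1).getD ""))

-- ===== PRECONDITION & SPEC =====
-- Pre_ excludes exactly the inputs where Python A raises IndexError: tables with
-- fewer than 2 rows (table[1]) or with an empty row (row[0]).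
def Pre_sort_table_columns (table : List (List String)) : Prop :=
  2 ≤ table.length ∧ ∀ row ∈ table, row ≠ []
instance (table : List (List String)) : Decidable (Pre_sort_table_columns table) := by
  unfold Pre_sort_table_columns; infer_instance

def pvWitness_sort_table_columns : List (List String) :=
  [["Model / Color", "B", "A"], ["x", "cc", "aa"], ["y", "1", "2"]]

def Spec_sort_table_columns (table : List (List String)) (out : List (List String)) : Prop :=
  out = sort_table_columns_alt table
instance (table : List (List String)) (out : List (List String)) : Decidable (Spec_sort_table_columns table out) := by
  unfold Spec_sort_table_columns; infer_instance

-- ===== CLAIM (what is proved, stated in full; the proofs are below) =====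
def Claim_equal_sort_table_columns : Prop := ∀ (table : List (List String)), Dom_sort_table_columns table → Pre_sort_table_columns table → Spec_sort_table_columns table (sort_table_columns table)

-- ===== LEMMAS AND PROOFS =====

-- insertion into a mapped list commutes with the map when the comparator factors
theorem pv_insertBy_map {α β : Type} (f : α → β) (b : β → β → Bool) (b' : α → α → Bool)
    (hb : ∀ x y, b (f x) (f y) = b' x y) (x : α) (l : List α) :
    PySem.List.insertBy b (f x) (l.map f) = (PySem.List.insertBy b' x l).map f := by
  induction l with
  | nil => simp [PySem.List.insertBy]
  | cons y ys ih =>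
    simp only [List.map_cons, PySem.List.insertBy, hb]
    by_cases h : b' x y = true
    · simp [h]
    · simp [h, ih]

theorem pv_foldl_insert_map {α β : Type} (f : α → β) (b : β → β → Bool) (b' : α → α → Bool)
    (hb : ∀ x y, b (f x) (f y) = b' x y) (xs l : List α) :
    List.foldl (fun acc x => PySem.List.insertBy b x acc) (l.map f) (xs.map f)
      = (List.foldl (fun acc x => PySem.List.insertBy b' x acc) l xs).map f := by
  induction xs generalizing l with
  | nil => simp
  | cons x xs ih =>
    simp only [List.map_cons, List.foldl_cons]
    rw [pv_insertBy_map f b b' hb, ih]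

-- stable sort commutes with map when the key factors through the map
theorem pv_sorted_map {α β κ : Type} [LinearOrder κ] (f : α → β) (key : β → κ) (xs : List α) :
    PySem.List.sorted (xs.map f) key false = (PySem.List.sorted xs (fun x => key (f x)) false).map f := by
  unfold PySem.List.sorted
  simpa using pv_foldl_insert_map f _ _ (fun x y => rfl) xs []

-- A's append loop is a map
theorem pv_foldl_append_map {α β : Type} (g : α → β) (xs : List α) (acc : List β) :
    List.foldl (fun acc row => acc ++ [g row]) acc xs = acc ++ xs.map g := by
  induction xs generalizing acc with
  | nil => simp
  | cons x xs ih => simp [ih]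

-- enumerate-driven row rebuilding: each row index looks its own row back up
theorem pv_enum_rows {α β : Type} (table : List α)
    (F : Int → α → β) (G : α → β)
    (h : ∀ (s : Nat) (x : α), table[s]? = some x → F (s : Int) x = G x) :
    ∀ (suffix : List α) (s : Nat), (∀ k : Nat, suffix[k]? = table[s + k]?) →
      (PySem.List.enumerate suffix (s : Int)).map (fun p => F p.1 p.2) = suffix.map G := by
  intro suffix
  induction suffix with
  | nil => intro s _; simp [PySem.List.enumerate]
  | cons x xs ih =>
    intro s hk
    have hx : table[s]? = some x := by
      have := hk 0; simpa using this.symm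
    have hrec := ih (s + 1) (fun k => by
      have := hk (k + 1)
      simpa [Nat.add_assoc, Nat.add_comm 1 k] using this)
    simp only [PySem.List.enumerate, List.map_cons]
    have hcast : ((s : Int) + 1) = ((s + 1 : Nat) : Int) := by push_cast; ring
    rw [hcast, h s x hx, hrec]

theorem pv_enum_rows0 {α β : Type} (table : List α) (F : Int → α → β) (G : α → β)
    (h : ∀ (s : Nat) (x : α), table[s]? = some x → F (s : Int) x = G x) :
    (PySem.List.enumerate table).map (fun p => F p.1 p.2) = table.map G := by
  have := pv_enum_rows table F G h table 0 (fun k => by simp)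
  simpa using this

set_option maxHeartbeats 1000000 in
theorem sort_table_columns_eq (table : List (List String)) :
    sort_table_columns table = sort_table_columns_alt table := by
  unfold sort_table_columns sort_table_columns_alt
  simp only []
  set fr := PySem.List.slice ((PySem.List.pyGet? table 1).getD []) (some 1) none with hfr
  set key : Int → String := fun i => (PySem.List.pyGet? fr i).getD "" with hkey
  set colf : Int → List String → String := fun i row =>
    if i + 1 < (row.length : Int) then (PySem.List.pyGet? row (i + 1)).getD "" else "" with hcolf
  set g : Int → String × List String := fun c => (key c, table.map (colf c)) with hg
  set alpha := PySem.List.sorted (PySem.List.pyRange 0 fr.length 1) key false with halpha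
  -- B's sorted columns are A's sorted indices, each carrying its column
  have hcols : PySem.List.sorted ((PySem.List.pyRange 0 fr.length 1).map g) (fun p => p.1) false
      = alpha.map g := by
    rw [pv_sorted_map g (fun p => p.1)]
  rw [hcols, pv_foldl_append_map]
  simp only [List.nil_append]
  refine Eq.symm (pv_enum_rows0 table
    (fun r row => ((PySem.List.pyGet? row 0).getD "") ::
      (alpha.map g).map (fun q => (PySem.List.pyGet? q.2 r).getD ""))
    (fun row => ((PySem.List.pyGet? row 0).getD "") :: alpha.map (fun i => colf i row)) ?_)
  intro s row hs
  simp only [List.map_map]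
  refine congrArg (List.cons _) (List.map_congr_left (fun i _ => ?_))
  show (PySem.List.pyGet? ((table.map (colf i))) (s : Int)).getD "" = colf i row
  rw [PySem.List.pyGet?_natCast]
  simp [List.getElem?_map, hs]

-- ===== VERDICT (by name: the statement is the Claim_ definition above) =====
theorem sort_table_columns_spec : Claim_equal_sort_table_columns := by
  intro table _ _
  exact sort_table_columns_eq table
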